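-- pv_equiv track=rewrite | github.com/jcbayley/coatopt | src/coatopt/environments/utils/state_utils.py | generate_valid_arrangements
-- ===== SOURCE A (Python) =====
-- def generate_valid_arrangements(materials, num_layers):
--     """
--     Generate all valid coating arrangements.
--
--     Args:
--         materials: List of available materials
--         num_layers: Number of layers
--
--     Returns:
--         List of valid arrangements
--     """
--     def backtrack(arrangement):
--         if len(arrangement) == num_layers:
--             return [arrangement[:]]
--
--         valid_arrangements = []
--         for material in materials:
--             # Add constraints here if needed (e.g., no adjacent identical materials)
--             arrangement.append(material)
--             valid_arrangements.extend(backtrack(arrangement))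
--             arrangement.pop()
--
--         return valid_arrangements
--
--     return backtrack([])
-- ===== SOURCE B (Python) =====
-- def generate_valid_arrangements(materials, num_layers):
--     """
--     Generate all valid coating arrangements.
--
--     Args:
--         materials: List of available materials
--         num_layers: Number of layers
--
--     Returns:
--         List of valid arrangements
--     """
--     result = [[]]
--     for _ in range(num_layers):
--         result = [r + [m] for r in result for m in materials]
--     return result
-- ===== Notes on version B (the rewrite author's own statement) =====
-- stated objective: simpler
-- what changed: Replaces the recursive backtracking with an in-place shared list by a breadth-first loop that extends every partial arrangement by one layer per pass, preserving A's lexicographic order.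
-- outside the precondition, e.g. on generate_valid_arrangements([], -1): A returns [], B returns [[]]; on generate_valid_arrangements([3], -1): A does not finish within the time limit, B returns [[]]
import Mathlib
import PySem

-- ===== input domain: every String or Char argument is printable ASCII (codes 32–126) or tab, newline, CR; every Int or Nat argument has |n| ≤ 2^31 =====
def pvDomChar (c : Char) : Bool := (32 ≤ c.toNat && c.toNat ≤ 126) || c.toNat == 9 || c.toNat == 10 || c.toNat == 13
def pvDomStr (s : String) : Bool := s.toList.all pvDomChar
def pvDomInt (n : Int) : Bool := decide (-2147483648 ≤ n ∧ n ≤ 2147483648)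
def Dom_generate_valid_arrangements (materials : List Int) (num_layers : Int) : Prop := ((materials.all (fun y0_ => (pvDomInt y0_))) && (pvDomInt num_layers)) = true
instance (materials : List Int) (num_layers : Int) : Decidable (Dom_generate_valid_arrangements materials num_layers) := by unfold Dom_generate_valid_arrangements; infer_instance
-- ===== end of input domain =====

-- B replaces A's recursive backtracking over a shared mutable list by a breadth-first
-- loop extending every partial arrangement one layer per pass (simpler decomposition).

-- ===== PORT A =====
-- A's recursion terminates only while len(arrangement) can still reach num_layers; the
-- fuel (num_layers - len) makes the Lean recursion total and is exact on Pre_ (0 ≤ num_layers,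
-- where backtrack from [] always stops at depth num_layers).
def backtrackA (materials : List Int) (num_layers : Int) (arrangement : List Int)
    (fuel : Nat) : List (List Int) :=
  if (arrangement.length : Int) = num_layers then [arrangement]
  else
    match fuel with
    | 0 => []   -- unreachable under Pre_ (A diverges here in Python)
    | fuel' + 1 =>
      materials.foldl
        (fun valid_arrangements material =>
          valid_arrangements ++ backtrackA materials num_layers (arrangement ++ [material]) fuel')
        []

def generate_valid_arrangements (materials : List Int) (num_layers : Int) : List (List Int) :=
  backtrackA materials num_layers [] num_layers.toNat

-- ===== PORT B =====
def generate_valid_arrangements_alt (materials : List Int) (num_layers : Int) : List (List Int) :=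
  (PySem.List.pyRange 0 num_layers 1).foldl
    (fun result _ => result.flatMap (fun r => materials.map (fun m => r ++ [m])))
    [[]]

-- ===== PRECONDITION & SPEC =====
-- Pre_ excludes negative num_layers: there A infinite-recurses for non-empty materials,
-- and for empty materials its accidental value [] differs from B's natural [[]].
def Pre_generate_valid_arrangements (materials : List Int) (num_layers : Int) : Prop :=
  0 ≤ num_layers
instance (materials : List Int) (num_layers : Int) : Decidable (Pre_generate_valid_arrangements materials num_layers) := by unfold Pre_generate_valid_arrangements; infer_instance

def pvWitness_generate_valid_arrangements : List Int × Int := ([1, 2], 2)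

def Spec_generate_valid_arrangements (materials : List Int) (num_layers : Int) (out : List (List Int)) : Prop := out = generate_valid_arrangements_alt materials num_layers
instance (materials : List Int) (num_layers : Int) (out : List (List Int)) : Decidable (Spec_generate_valid_arrangements materials num_layers out) := by unfold Spec_generate_valid_arrangements; infer_instance

-- ===== CLAIM (what is proved, stated in full; the proofs are below) =====
def Claim_equal_generate_valid_arrangements : Prop := ∀ (materials : List Int) (num_layers : Int), Dom_generate_valid_arrangements materials num_layers → Pre_generate_valid_arrangements materials num_layers → Spec_generate_valid_arrangements materials num_layers (generate_valid_arrangements materials num_layers)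

-- ===== LEMMAS AND PROOFS =====

-- one breadth-first step of B
def stepB (materials : List Int) (l : List (List Int)) : List (List Int) :=
  l.flatMap (fun r => materials.map (fun m => r ++ [m]))

lemma stepB_iterate_flatMap (materials : List Int) (k : Nat) (l : List (List Int)) :
    (stepB materials)^[k] l = l.flatMap (fun r => (stepB materials)^[k] [r]) := by
  induction k generalizing l with
  | zero => simp
  | succ k ih =>
    simp only [Function.iterate_succ_apply]
    rw [ih (stepB materials l)]
    have hrhs : ∀ r ∈ l, (stepB materials)^[k] (stepB materials [r])
        = (stepB materials [r]).flatMap (fun r' => (stepB materials)^[k] [r']) := by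
      intro r _; exact ih (stepB materials [r])
    rw [List.flatMap_congr hrhs, ← List.flatMap_assoc]
    have : l.flatMap (fun r => stepB materials [r]) = stepB materials l := by
      simp [stepB]
    rw [this]

lemma backtrackA_eq_iterate (materials : List Int) (num_layers : Int)
    (fuel : Nat) (arrangement : List Int)
    (h : num_layers = arrangement.length + fuel) :
    backtrackA materials num_layers arrangement fuel =
      (stepB materials)^[fuel] [arrangement] := by
  induction fuel generalizing arrangement with
  | zero =>
    rw [backtrackA]
    simp only [Function.iterate_zero, id]
    rw [if_pos (by omega)]
  | succ fuel ih =>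
    rw [backtrackA]
    rw [if_neg (by omega)]
    rw [PySem.List.foldl_append_eq_flatMap]
    simp only [List.nil_append]
    have hbody : ∀ m ∈ materials,
        backtrackA materials num_layers (arrangement ++ [m]) fuel =
          (stepB materials)^[fuel] [arrangement ++ [m]] := by
      intro m _
      exact ih (arrangement ++ [m]) (by simp; omega)
    rw [List.flatMap_congr hbody]
    rw [Function.iterate_succ_apply]
    rw [stepB_iterate_flatMap]
    simp [stepB, List.flatMap_map]

lemma foldl_const_eq_iterate {α β : Type} (f : α → α) (l : List β) (init : α) :
    l.foldl (fun a _ => f a) init = f^[l.length] init := by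
  induction l generalizing init with
  | nil => rfl
  | cons x xs ih => simp [List.foldl_cons, ih, Function.iterate_succ_apply]

-- ===== VERDICT (by name: the statement is the Claim_ definition above) =====
theorem generate_valid_arrangements_spec : Claim_equal_generate_valid_arrangements := by
  intro materials num_layers _ hpre
  unfold Spec_generate_valid_arrangements
  unfold generate_valid_arrangements generate_valid_arrangements_alt
  unfold Pre_generate_valid_arrangements at hpre
  rw [backtrackA_eq_iterate materials num_layers num_layers.toNat [] (by simp; omega)]
  rw [foldl_const_eq_iterate]
  rw [PySem.List.length_pyRange_one]
  simp only [Int.sub_zero]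
  unfold stepB
  rfl
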